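-- pv_equiv track=rewrite | github.com/Elen09/PYTHON | desafio.py | codificacion
-- ===== SOURCE A (Python) =====
-- diccionario = {'a': '2', 'b': '22', 'c': '222', 'd': '3', 'e': '33', 'f': '333',
--             'g': '4', 'h': '44', 'i': '444', 'j': '5', 'k': '55', 'l': '555',
--             'm': '6', 'n': '66', 'o': '666', 'p': '7', 'q': '77', 'r': '777',
--             's': '7777', 't': '8', 'u': '88', 'v': '888', 'w': '9', 'x': '99',
--             'y': '999', 'z': '9999'}
--
-- def codificacion(mensaje):
--     msjCodif, carPrev = '', ' '
--     for char in mensaje: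
--         if char == ' ':
--             msjCodif += '0'
--             carPrev = '0'
--         elif carPrev in diccionario[char]:
--             msjCodif += (' ' + diccionario[char])
--             carPrev = diccionario[char][0]
--         else:
--             msjCodif += (diccionario[char])
--             carPrev = diccionario[char][0]
--     return msjCodif
-- ===== SOURCE B (Python) =====
-- diccionario = {'a': '2', 'b': '22', 'c': '222', 'd': '3', 'e': '33', 'f': '333',
--             'g': '4', 'h': '44', 'i': '444', 'j': '5', 'k': '55', 'l': '555',
--             'm': '6', 'n': '66', 'o': '666', 'p': '7', 'q': '77', 'r': '777',
--             's': '7777', 't': '8', 'u': '88', 'v': '888', 'w': '9', 'x': '99',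
--             'y': '999', 'z': '9999'}
--
-- def codificacion(mensaje):
--     # encode one space-free word: zip adjacent letter pairs and insert the
--     # separating ' ' whenever the two letters live on the same button
--     def palabra(w):
--         if not w:
--             return ''
--         piezas = [diccionario[w[0]]]
--         for p, c in zip(w, w[1:]):
--             if diccionario[p][0] == diccionario[c][0]:
--                 piezas.append(' ')
--             piezas.append(diccionario[c])
--         return ''.join(piezas)
--     # spaces become '0': split the message into words and rejoin with '0'
--     return '0'.join(palabra(w) for w in mensaje.split(' '))
-- ===== Notes on version B (the rewrite author's own statement) =====
-- stated objective: alternative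
-- what changed: Replaces A's single character loop with a running carPrev state by a split/join scheme: the message is split into words on spaces, each word is encoded by zipping adjacent letter pairs (the separating ' ' is decided from the two characters' buttons, no running state), and the words are rejoined with '0'.
-- outside the precondition, e.g. on codificacion('a1'): A raises KeyError, B raises KeyError; on codificacion('0'): A raises KeyError, B raises KeyError
import Mathlib
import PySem

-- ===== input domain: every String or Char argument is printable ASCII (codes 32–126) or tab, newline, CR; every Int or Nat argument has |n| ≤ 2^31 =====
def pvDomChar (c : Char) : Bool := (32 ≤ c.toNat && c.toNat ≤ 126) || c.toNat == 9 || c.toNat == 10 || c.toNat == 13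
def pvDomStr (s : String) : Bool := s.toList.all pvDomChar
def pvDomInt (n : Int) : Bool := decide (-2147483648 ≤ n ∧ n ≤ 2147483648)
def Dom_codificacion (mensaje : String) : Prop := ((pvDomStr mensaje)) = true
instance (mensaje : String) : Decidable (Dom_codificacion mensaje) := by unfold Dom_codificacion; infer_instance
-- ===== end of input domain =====

-- B replaces A's single stateful loop (running carPrev) by split-on-spaces /
-- per-word adjacent-pair encoding / '0'-join; objective: alternative, same cost.

-- ===== PORT A =====
-- the module-level dict 'diccionario' (lookup: none = KeyError)
def dicc : Char → Option String
  | 'a' => some "2"    | 'b' => some "22"   | 'c' => some "222"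
  | 'd' => some "3"    | 'e' => some "33"   | 'f' => some "333"
  | 'g' => some "4"    | 'h' => some "44"   | 'i' => some "444"
  | 'j' => some "5"    | 'k' => some "55"   | 'l' => some "555"
  | 'm' => some "6"    | 'n' => some "66"   | 'o' => some "666"
  | 'p' => some "7"    | 'q' => some "77"   | 'r' => some "777"
  | 's' => some "7777" | 't' => some "8"    | 'u' => some "88"
  | 'v' => some "888"  | 'w' => some "9"    | 'x' => some "99"
  | 'y' => some "999"  | 'z' => some "9999"
  | _   => none

-- A's loop; msjCodif as List Char; carPrev (always a 1-char string in Python) as a Char,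
-- so 'carPrev in diccionario[char]' (1-char substring test) is list membership; none = KeyError;
-- the inner match on t.toList mirrors the indexing diccionario[char][0] (none = IndexError, unreachable).
def loopA : List Char → List Char → Char → Option (List Char)
  | [], acc, _ => some acc
  | c :: cs, acc, prev =>
    if c = ' ' then loopA cs (acc ++ ['0']) '0'
    else
      match dicc c with
      | none => none
      | some t =>
        match t.toList with
        | [] => none
        | h :: _ =>
          if prev ∈ t.toList then loopA cs (acc ++ ' ' :: t.toList) h
          else loopA cs (acc ++ t.toList) h

def codificacion (mensaje : String) : String :=
  String.ofList ((loopA mensaje.toList [] ' ').getD [])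

-- ===== PORT B =====
-- mensaje.split(' '): split on every single space, keeping empty pieces (hand-ported, exact)
def splitSp : List Char → List (List Char)
  | [] => [[]]
  | c :: cs =>
    if c = ' ' then [] :: splitSp cs
    else
      match splitSp cs with
      | [] => [[c]]          -- unreachable: splitSp never returns []
      | w :: ws => (c :: w) :: ws

-- the zip(w, w[1:]) loop of palabra: pieces for each adjacent pair (p, c);
-- diccionario[p][0] == diccionario[c][0] via head?; none = KeyError
def pairEnc : Char → List Char → Option (List Char)
  | _, [] => some []
  | p, c :: cs =>
    match dicc p, dicc c with
    | some tp, some tc =>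
        (pairEnc c cs).map (fun r =>
          (if tp.toList.head? = tc.toList.head? then [' '] else []) ++ tc.toList ++ r)
    | _, _ => none

-- palabra(w)
def wordEnc : List Char → Option (List Char)
  | [] => some []
  | h :: w =>
    match dicc h with
    | none => none
    | some t => (pairEnc h w).map (fun r => t.toList ++ r)

-- '0'.join(palabra(w) for w in …)
def tailJoin : List (List Char) → Option (List Char)
  | [] => some []
  | w :: ws =>
    match wordEnc w, tailJoin ws with
    | some a, some b => some ('0' :: a ++ b)
    | _, _ => none

def joinWords : List (List Char) → Option (List Char)
  | [] => some []
  | w :: ws =>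
    match wordEnc w, tailJoin ws with
    | some a, some b => some (a ++ b)
    | _, _ => none

def codificacion_alt (mensaje : String) : String :=
  String.ofList ((joinWords (splitSp mensaje.toList)).getD [])

-- ===== PRECONDITION & SPEC =====
-- Pre_ excludes exactly the inputs containing a character that is not a space and not a
-- lowercase letter a-z: on those Python A raises KeyError (and so does B).
def Pre_codificacion (mensaje : String) : Prop :=
  (mensaje.toList.all (fun c => c == ' ' || ('a' ≤ c && c ≤ 'z'))) = true
instance (mensaje : String) : Decidable (Pre_codificacion mensaje) := by
  unfold Pre_codificacion; infer_instance
def pvWitness_codificacion : String := "hola mundo"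

def Spec_codificacion (mensaje : String) (out : String) : Prop := out = codificacion_alt mensaje
instance (mensaje : String) (out : String) : Decidable (Spec_codificacion mensaje out) := by unfold Spec_codificacion; infer_instance

-- ===== CLAIM (what is proved, stated in full; the proofs are below) =====
def Claim_equal_codificacion : Prop := ∀ (mensaje : String), Dom_codificacion mensaje → Pre_codificacion mensaje → Spec_codificacion mensaje (codificacion mensaje)

-- ===== LEMMAS AND PROOFS =====

-- A's loop with the accumulator factored out
def G : List Char → Char → Option (List Char)
  | [], _ => some []
  | c :: cs, prev =>
    if c = ' ' then (G cs '0').map ('0' :: ·)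
    else
      match dicc c with
      | none => none
      | some t =>
        match t.toList with
        | [] => none
        | h :: _ =>
          if prev ∈ t.toList then (G cs h).map (' ' :: t.toList ++ ·)
          else (G cs h).map (t.toList ++ ·)

lemma loopA_eq_G (cs : List Char) : ∀ (acc : List Char) (prev : Char),
    loopA cs acc prev = (G cs prev).map (acc ++ ·) := by
  induction cs with
  | nil => intro acc prev; simp [loopA, G]
  | cons c cs ih =>
    intro acc prev
    by_cases hc : c = ' '
    · subst hc; rw [loopA, if_pos rfl, G, if_pos rfl, ih]
      cases G cs '0' <;> simp
    · rw [loopA, if_neg hc, G, if_neg hc]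
      cases hd : dicc c with
      | none => rfl
      | some t =>
        dsimp only
        cases t.toList with
        | nil => rfl
        | cons h rest =>
          dsimp only
          by_cases hm : prev ∈ h :: rest
          · rw [if_pos hm, if_pos hm, ih]; cases G cs h <;> simp
          · rw [if_neg hm, if_neg hm, ih]; cases G cs h <;> simp

-- shape of every dict value: nonempty, all chars equal its head, head neither ' ' nor '0'
def shapeOK (t : String) : Bool :=
  match t.toList with
  | [] => false
  | h :: hs => h != ' ' && h != '0' && hs.all (· == h)

lemma dicc_shape (c : Char) (t : String) (h : dicc c = some t) : shapeOK t = true := by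
  unfold dicc at h
  split at h <;> simp_all <;> (subst h; decide)

lemma splitSp_ne_nil (cs : List Char) : splitSp cs ≠ [] := by
  cases cs with
  | nil => simp [splitSp]
  | cons c cs =>
    rw [splitSp]
    split
    · simp
    · cases h : splitSp cs <;> simp

lemma tailJoin_eq (w : List Char) (ws : List (List Char)) :
    tailJoin (w :: ws) = (joinWords (w :: ws)).map ('0' :: ·) := by
  rw [tailJoin, joinWords]
  cases wordEnc w <;> cases tailJoin ws <;> rfl

lemma joinWords_nil_cons (w : List Char) (ws : List (List Char)) :
    joinWords ([] :: w :: ws) = (joinWords (w :: ws)).map ('0' :: ·) := by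
  rw [joinWords, tailJoin_eq]
  cases joinWords (w :: ws) <;> rfl

-- reduction helpers (rfl; the two-scrutinee matches have no usable equation lemmas)
lemma pairEnc_cons (p c : Char) (cs : List Char) :
    pairEnc p (c :: cs) =
      match dicc p, dicc c with
      | some tp, some tc =>
          (pairEnc c cs).map (fun r =>
            (if tp.toList.head? = tc.toList.head? then [' '] else []) ++ tc.toList ++ r)
      | _, _ => none := rfl

lemma wordEnc_cons (a : Char) (w : List Char) :
    wordEnc (a :: w) =
      match dicc a with
      | none => none
      | some t => (pairEnc a w).map (fun r => t.toList ++ r) := rfl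

-- main invariant: A's stateless loop G against B's split/encode/join, for each
-- reachable state (boundary ' '/'0', or the head digit of the previous letter's token)
lemma G_eq_B (cs : List Char) :
    (∀ b, b = ' ' ∨ b = '0' → G cs b = joinWords (splitSp cs)) ∧
    (∀ p tp h rest, dicc p = some tp → tp.toList = h :: rest →
      G cs h = (match splitSp cs with
        | [] => none
        | w :: ws =>
          match pairEnc p w, tailJoin ws with
          | some a, some b => some (a ++ b)
          | _, _ => none)) := by
  induction cs with
  | nil =>
    constructor
    · intro b _; simp [G, splitSp, joinWords, wordEnc, tailJoin]
    · intro p tp h rest _ _; simp [G, splitSp, pairEnc, tailJoin]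
  | cons c cs ih =>
    obtain ⟨ihB, ihL⟩ := ih
    by_cases hc : c = ' '
    · subst hc
      constructor
      · intro b hb
        rw [G, if_pos rfl, ihB '0' (Or.inr rfl), splitSp, if_pos rfl]
        cases hs : splitSp cs with
        | nil => exact absurd hs (splitSp_ne_nil cs)
        | cons w ws =>
          rw [joinWords_nil_cons]
      · intro p tp h rest hp htl
        rw [G, if_pos rfl, ihB '0' (Or.inr rfl), splitSp, if_pos rfl]
        cases hs : splitSp cs with
        | nil => exact absurd hs (splitSp_ne_nil cs)
        | cons w ws =>
          dsimp only
          rw [tailJoin_eq]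
          cases joinWords (w :: ws) <;> rfl
    · -- c is not a space
      have split_cons : ∀ w ws, splitSp cs = w :: ws →
          splitSp (c :: cs) = (c :: w) :: ws := by
        intro w ws hs
        rw [splitSp, if_neg hc, hs]
      constructor
      · intro b hb
        rw [G, if_neg hc]
        cases hd : dicc c with
        | none =>
          dsimp only
          cases hs : splitSp cs with
          | nil => exact absurd hs (splitSp_ne_nil cs)
          | cons w ws =>
            rw [split_cons w ws hs, joinWords, wordEnc_cons, hd]
        | some t =>
          have hsh := dicc_shape c t hd
          dsimp only
          cases htl : t.toList with
          | nil => simp [shapeOK, htl] at hsh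
          | cons h rest =>
            simp only [shapeOK, htl, List.all_eq_true, bne_iff_ne, Bool.and_eq_true,
              beq_iff_eq] at hsh
            obtain ⟨⟨hsp, h0⟩, hall⟩ := hsh
            have hbm : b ∉ h :: rest := by
              intro hm
              rcases hb with rfl | rfl <;>
                rcases List.mem_cons.mp hm with e | e <;>
                  first
                    | exact hsp e.symm
                    | exact h0 e.symm
                    | exact hsp ((hall _ e).symm)
                    | exact h0 ((hall _ e).symm)
            dsimp only
            rw [if_neg hbm, ihL c t h rest hd htl]
            cases hs : splitSp cs with
            | nil => exact absurd hs (splitSp_ne_nil cs)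
            | cons w ws =>
              rw [split_cons w ws hs, joinWords, wordEnc_cons, hd]
              dsimp only
              rw [htl]
              cases pairEnc c w <;> cases tailJoin ws <;> simp
      · intro p tp hp restp hpd hptl
        rw [G, if_neg hc]
        cases hd : dicc c with
        | none =>
          dsimp only
          cases hs : splitSp cs with
          | nil => exact absurd hs (splitSp_ne_nil cs)
          | cons w ws =>
            rw [split_cons w ws hs]
            dsimp only
            rw [pairEnc_cons, hpd, hd]
        | some t =>
          have hsh := dicc_shape c t hd
          dsimp only
          cases htl : t.toList with
          | nil => simp [shapeOK, htl] at hsh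
          | cons h rest =>
            simp only [shapeOK, htl, List.all_eq_true, bne_iff_ne, Bool.and_eq_true,
              beq_iff_eq] at hsh
            obtain ⟨⟨hsp, h0⟩, hall⟩ := hsh
            have hmem : hp ∈ h :: rest ↔ hp = h := by
              simp only [List.mem_cons]
              exact ⟨fun hx => hx.elim id (fun e => hall _ e), fun e => Or.inl e⟩
            have hheads : (tp.toList.head? = t.toList.head?) ↔ hp = h := by
              rw [hptl, htl]; simp
            dsimp only
            rw [ihL c t h rest hd htl]
            cases hs : splitSp cs with
            | nil => exact absurd hs (splitSp_ne_nil cs)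
            | cons w ws =>
              rw [split_cons w ws hs]
              dsimp only
              rw [pairEnc_cons, hpd, hd]
              dsimp only
              by_cases he : hp = h
              · rw [if_pos (hmem.mpr he), if_pos (hheads.mpr he), htl]
                cases pairEnc c w <;> cases tailJoin ws <;> simp
              · rw [if_neg (fun hm => he (hmem.mp hm)),
                    if_neg (fun hm => he (hheads.mp hm)), htl]
                cases pairEnc c w <;> cases tailJoin ws <;> simp

-- ===== VERDICT (by name: the statement is the Claim_ definition above) =====
theorem codificacion_spec : Claim_equal_codificacion := by
  intro mensaje _ _
  unfold Spec_codificacion codificacion codificacion_alt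
  rw [loopA_eq_G]
  rw [(G_eq_B mensaje.toList).1 ' ' (Or.inl rfl)]
  cases joinWords (splitSp mensaje.toList) <;> rfl
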